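-- pv_equiv track=rewrite | github.com/MangoManGeek/IoT-SMARTHOME | Finalized Source Code/Data Managing/derivative_analyzer.py | computeDerivatives
-- ===== SOURCE A (Python) =====
-- def computeDerivatives(data):
--     result = list()
--     num_dimensions = len(data[0])
--     for dimension in range(num_dimensions):
--         result.append(list())
--     last = None
--     for item in data:
--         if(last is not None):
--             for i in range(len(item)):
--                 result[i].append(item[i]-last[i])
--         last = item
--     return result
-- ===== SOURCE B (Python) =====
-- def computeDerivatives(data):
--     num_dimensions = len(data[0])
--     result = []
--     for d in range(num_dimensions):
--         col = [row[d] for row in data]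
--         result.append([b - a for a, b in zip(col, col[1:])])
--     return result
-- ===== Notes on version B (the rewrite author's own statement) =====
-- stated objective: alternative
-- what changed: B differences each dimension column-major (extract column d, zip it with its shift) instead of A's row-by-row streaming pass that carries the previous row and appends into per-dimension accumulators.
-- outside the precondition, e.g. on computeDerivatives([[1, 2], [3]]): A returns [[2], []], B raises IndexError
import Mathlib
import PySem

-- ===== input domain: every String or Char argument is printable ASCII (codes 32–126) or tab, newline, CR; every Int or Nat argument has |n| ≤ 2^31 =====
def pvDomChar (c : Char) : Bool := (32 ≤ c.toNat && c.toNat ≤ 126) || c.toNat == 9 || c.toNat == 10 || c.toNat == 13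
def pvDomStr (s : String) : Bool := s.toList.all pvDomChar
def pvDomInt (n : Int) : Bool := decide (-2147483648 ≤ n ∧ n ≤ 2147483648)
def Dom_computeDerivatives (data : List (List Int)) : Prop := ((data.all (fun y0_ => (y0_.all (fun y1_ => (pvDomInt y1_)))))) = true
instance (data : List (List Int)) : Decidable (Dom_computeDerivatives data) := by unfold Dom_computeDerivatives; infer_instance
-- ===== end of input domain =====

-- B differences each dimension column-major (column d zipped with its shift)
-- instead of A's row-by-row streaming pass carrying the previous row; same cost.

-- ===== PORT A =====
-- One row of A's outer loop: if last is set, append item[i]-last[i] to result[i]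
-- for each i in range(len(item)); then last := item.  Indices are in range on
-- every input admitted by Pre_, so getD is exact there.
def cdStep (st : List (List Int) × Option (List Int)) (item : List Int) :
    List (List Int) × Option (List Int) :=
  match st with
  | (result, last) =>
    let result' :=
      match last with
      | none => result
      | some l =>
        (List.range item.length).foldl
          (fun r i => r.set i (r.getD i [] ++ [item.getD i 0 - l.getD i 0])) result
    (result', some item)

def computeDerivatives (data : List (List Int)) : List (List Int) :=
  let numDimensions := (data.headD []).length   -- data[0]; raises in Python on [], excluded by Pre_
  let result := List.replicate numDimensions ([] : List Int)
  (data.foldl cdStep (result, none)).1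

-- ===== PORT B =====
def computeDerivatives_alt (data : List (List Int)) : List (List Int) :=
  let numDimensions := (data.headD []).length   -- data[0]; raises in Python on [], excluded by Pre_
  (List.range numDimensions).map (fun d =>
    let col := data.map (fun row => row.getD d 0)
    (col.zip col.tail).map (fun p => p.2 - p.1))

-- ===== PRECONDITION & SPEC =====
-- Pre_ excludes empty data (Python A raises IndexError at data[0]) and ragged
-- rows: on ragged data A either raises or returns an accidental per-row-length
-- truncation (e.g. [[1,2],[3]] ↦ [[2],[]]) while B raises; a uniform number of
-- dimensions is the function's evident contract.
def Pre_computeDerivatives (data : List (List Int)) : Prop :=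
  data ≠ [] ∧ ∀ r ∈ data, r.length = (data.headD []).length
instance (data : List (List Int)) : Decidable (Pre_computeDerivatives data) := by
  unfold Pre_computeDerivatives; infer_instance

def pvWitness_computeDerivatives : List (List Int) := [[1, 2], [3, 5], [0, 9]]

def Spec_computeDerivatives (data : List (List Int)) (out : List (List Int)) : Prop :=
  out = computeDerivatives_alt data
instance (data : List (List Int)) (out : List (List Int)) : Decidable (Spec_computeDerivatives data out) := by
  unfold Spec_computeDerivatives; infer_instance

-- ===== CLAIM (what is proved, stated in full; the proofs are below) =====
def Claim_equal_computeDerivatives : Prop :=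
  ∀ (data : List (List Int)), Dom_computeDerivatives data →
    Pre_computeDerivatives data →
      Spec_computeDerivatives data (computeDerivatives data)

-- ===== LEMMAS AND PROOFS =====

-- reference "consecutive differences" of prev :: col
def cdDiffs (prev : Int) : List Int → List Int
  | [] => []
  | x :: xs => (x - prev) :: cdDiffs x xs

theorem cdDiffs_zip (x : Int) (xs : List Int) :
    ((x :: xs).zip xs).map (fun p => p.2 - p.1) = cdDiffs x xs := by
  induction xs generalizing x with
  | nil => rfl
  | cons y ys ih =>
    simp only [List.zip_cons_cons, List.map_cons, cdDiffs]
    rw [ih]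

theorem cd_inner (f : Nat → Int) (m : Nat) (res : List (List Int)) (hm : m ≤ res.length) :
    (List.range m).foldl (fun r i => r.set i (r.getD i [] ++ [f i])) res
      = (List.range res.length).map
          (fun d => if d < m then res.getD d [] ++ [f d] else res.getD d []) := by
  induction m with
  | zero =>
    simp only [List.range_zero, List.foldl_nil]
    apply List.ext_getElem
    · simp
    · intro i p _
      simp [List.getElem?_eq_getElem p]
  | succ m ih =>
    rw [List.range_succ, List.foldl_append, ih (Nat.le_of_succ_le hm)]
    simp only [List.foldl_cons, List.foldl_nil]
    have hXgd : ((List.range res.length).map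
        (fun d => if d < m then res.getD d [] ++ [f d] else res.getD d [])).getD m []
        = res.getD m [] := by
      rw [List.getD_eq_getElem _ _ (by simp; omega)]
      simp
    rw [hXgd]
    apply List.ext_getElem
    · simp
    · intro d hd hd'
      simp only [List.length_set, List.length_map, List.length_range] at hd
      rw [List.getElem_set]
      by_cases h : m = d
      · subst h
        simp
      · rw [if_neg h]
        simp only [List.getElem_map, List.getElem_range]
        by_cases h2 : d < m
        · simp [h2, show d < m + 1 by omega]
        · simp [h2, show ¬ d < m + 1 by omega]

-- invariant of A's outer loop after the first row
theorem cd_fold (n : Nat) (rows : List (List Int)) (l : List Int) (res : List (List Int))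
    (hres : res.length = n) (hl : l.length = n) (hrows : ∀ r ∈ rows, r.length = n) :
    (rows.foldl cdStep (res, some l)).1
      = (List.range n).map
          (fun d => res.getD d [] ++ cdDiffs (l.getD d 0) (rows.map (fun r => r.getD d 0))) := by
  induction rows generalizing l res with
  | nil =>
    simp only [List.foldl_nil, List.map_nil, cdDiffs]
    apply List.ext_getElem
    · simp [hres]
    · intro d hd hd'
      simp only [List.length_map, List.length_range] at hd'
      simp only [List.getElem_map, List.getElem_range, List.append_nil]
      rw [List.getD_eq_getElem _ _ (by omega : d < res.length)]
  | cons r rows ih =>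
    have hr : r.length = n := hrows r (by simp)
    have hst : rows.foldl cdStep (cdStep (res, some l) r) = rows.foldl cdStep
        ((List.range r.length).foldl
          (fun rr i => rr.set i (rr.getD i [] ++ [r.getD i 0 - l.getD i 0])) res, some r) := by
      rfl
    rw [List.foldl_cons, hst,
      cd_inner (fun i => r.getD i 0 - l.getD i 0) r.length res (by omega),
      ih r _ (by simp [hres]) hr (fun r hm => hrows r (by simp [hm]))]
    apply List.ext_getElem
    · simp
    · intro d hd hd'
      simp only [List.length_map, List.length_range] at hd
      simp only [List.getElem_map, List.getElem_range, List.map_cons, cdDiffs]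
      have : ((List.range res.length).map
          (fun d => if d < r.length then res.getD d [] ++ [r.getD d 0 - l.getD d 0]
                    else res.getD d [])).getD d []
          = res.getD d [] ++ [r.getD d 0 - l.getD d 0] := by
        rw [List.getD_eq_getElem _ _ (by simp; omega)]
        simp [show d < r.length by omega]
      rw [this]
      simp

-- ===== VERDICT (by name: the statement is the Claim_ definition above) =====
theorem computeDerivatives_spec : Claim_equal_computeDerivatives := by
  intro data _ hpre
  obtain ⟨hne, hrect⟩ := hpre
  unfold Spec_computeDerivatives computeDerivatives computeDerivatives_alt
  match data, hne with
  | first :: rest, _ => ?_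
  simp only [List.headD_cons] at hrect ⊢
  have hrest : ∀ r ∈ rest, r.length = first.length := fun r hr =>
    hrect r (by simp [hr])
  rw [List.foldl_cons]
  have h1 : cdStep (List.replicate first.length ([] : List Int), none) first
      = (List.replicate first.length ([] : List Int), some first) := rfl
  rw [h1, cd_fold first.length rest first _ (by simp) rfl hrest]
  apply List.map_congr_left
  intro d hd
  simp only [List.mem_range] at hd
  have hget : (List.replicate first.length ([] : List Int)).getD d [] = [] := by
    rw [List.getD_eq_getElem _ _ (by simpa using hd)]; simp
  rw [hget, List.nil_append]
  simp only [List.map_cons]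
  rw [List.tail_cons, cdDiffs_zip]
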